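-- pv_equiv track=rewrite | github.com/ryanvilbrandt/advent_of_code | aoc_2024/day_5/problem.py | check_pages
-- ===== SOURCE A (Python) =====
-- Rules = dict[int, list[int]]
--
-- def check_pages(rules: Rules, pages: list[int]) -> bool:
--     checked_pages = set()
--     for page in pages:
--         # Get list of pages that must come after the current page
--         page_rules = rules[page]
--         # Check if any of those pages have already been checked
--         invalid_pages = checked_pages.intersection(page_rules)
--         if invalid_pages:
--             # If any pages have come before this one, but the rules say they must come after, fail.
--             return False
--         # Add current page to checked pages
--         checked_pages.add(page)
--     return True
-- ===== SOURCE B (Python) =====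
-- def check_pages(rules, pages):
--     # Per-distinct-page judgement instead of a running scan: page p's rule list
--     # is violated iff some successor's first occurrence precedes p's last occurrence.
--     n = len(pages)
--     rev = list(reversed(pages))
--     for p in dict.fromkeys(pages):  # distinct pages, first-occurrence order
--         last_p = n - 1 - rev.index(p)
--         for s in rules[p]:
--             if s in pages and pages.index(s) < last_p:
--                 return False
--     return True
-- ===== Notes on version B (the rewrite author's own statement) =====
-- stated objective: alternative
-- what changed: Instead of a single pass maintaining a seen-set intersected with each rule list, B judges each distinct page independently: its rule list is violated iff some successor's first occurrence index (list.index) precedes the page's last occurrence index (via the reversed list), with no running state.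
import Mathlib
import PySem

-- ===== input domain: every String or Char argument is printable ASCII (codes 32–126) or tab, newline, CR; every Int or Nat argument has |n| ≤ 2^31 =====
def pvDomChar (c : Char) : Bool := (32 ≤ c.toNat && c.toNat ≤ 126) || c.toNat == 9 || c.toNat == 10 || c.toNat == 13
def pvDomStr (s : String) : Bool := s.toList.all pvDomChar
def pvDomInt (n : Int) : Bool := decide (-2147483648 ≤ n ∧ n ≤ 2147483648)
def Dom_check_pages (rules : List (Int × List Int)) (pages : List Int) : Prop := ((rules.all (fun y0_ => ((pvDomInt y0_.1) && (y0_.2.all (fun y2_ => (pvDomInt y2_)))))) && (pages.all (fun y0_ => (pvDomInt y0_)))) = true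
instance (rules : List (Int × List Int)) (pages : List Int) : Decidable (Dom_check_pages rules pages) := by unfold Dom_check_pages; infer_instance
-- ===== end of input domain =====

-- B replaces A's single pass with a growing seen-set by a per-distinct-page judgement:
-- page p's rule list is violated iff some successor's first-occurrence index precedes
-- p's last-occurrence index (alternative decomposition, no speed claim).

-- rules[p] as a dict lookup (total form with default []; the Pythons raise KeyError on a missing key — those inputs lie outside Pre_)
def pvRules (rules : List (Int × List Int)) (p : Int) : List Int :=
  (PySem.Dict.ofList rules).getD p []

-- ===== PORT A =====
def checkPagesGo (rules : List (Int × List Int)) : List Int → PySem.Set Int → Bool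
  | [], _ => true
  | page :: rest, checked_pages =>
    let page_rules := pvRules rules page
    let invalid_pages := PySem.Set.inter checked_pages page_rules
    if invalid_pages.isEmpty then
      checkPagesGo rules rest (PySem.Set.add checked_pages page)
    else
      false

def check_pages (rules : List (Int × List Int)) (pages : List Int) : Bool :=
  checkPagesGo rules pages PySem.Set.empty

-- ===== PORT B =====
-- body of B's per-page check: rev.index(p) and the inner for-loop over rules[p]
def ruleViolated (rules : List (Int × List Int)) (pages rev : List Int) (n : Int) (p : Int) : Bool :=
  match PySem.List.index? rev p with
  | none => false   -- unreachable: p is drawn from pages, so rev.index(p) succeeds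
  | some ri =>
    (pvRules rules p).any (fun s =>
      pages.contains s &&
      (match PySem.List.index? pages s with
       | none => false   -- unreachable under the contains guard
       | some si => decide ((si : Int) < n - 1 - (ri : Int))))

def checkAltGo (rules : List (Int × List Int)) (pages rev : List Int) (n : Int) : List Int → Bool
  | [] => true
  | p :: rest =>
    if ruleViolated rules pages rev n p then false
    else checkAltGo rules pages rev n rest

def check_pages_alt (rules : List (Int × List Int)) (pages : List Int) : Bool :=
  checkAltGo rules pages pages.reverse (PySem.List.len pages) (PySem.List.dedup pages)

-- ===== PRECONDITION & SPEC =====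
-- Pre_ is exactly the Python A's domain: it admits an input iff every page has an entry in
-- rules, or an ordering violation occurs within a fully-keyed prefix (A returns False there
-- before reaching the unkeyed page); everywhere else A raises KeyError.
def Pre_check_pages (rules : List (Int × List Int)) (pages : List Int) : Prop :=
  (∀ p ∈ pages, p ∈ rules.map (·.1)) ∨
  (∃ j < pages.length, ∃ i < j,
    (∀ k ≤ j, pages.getD k 0 ∈ rules.map (·.1)) ∧
    pages.getD i 0 ∈ (PySem.Dict.ofList rules).getD (pages.getD j 0) [])
instance (rules : List (Int × List Int)) (pages : List Int) : Decidable (Pre_check_pages rules pages) := by unfold Pre_check_pages; infer_instance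

def pvWitness_check_pages : (List (Int × List Int)) × List Int :=
  ([(1, [2]), (2, [])], [1, 2])

def Spec_check_pages (rules : List (Int × List Int)) (pages : List Int) (out : Bool) : Prop := out = check_pages_alt rules pages
instance (rules : List (Int × List Int)) (pages : List Int) (out : Bool) : Decidable (Spec_check_pages rules pages out) := by unfold Spec_check_pages; infer_instance

-- ===== CLAIM (what is proved, stated in full; the proofs are below) =====
def Claim_equal_check_pages : Prop := ∀ (rules : List (Int × List Int)) (pages : List Int), Dom_check_pages rules pages → Pre_check_pages rules pages → Spec_check_pages rules pages (check_pages rules pages)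

-- ===== LEMMAS AND PROOFS =====

-- the pairwise condition A decides (parameterised by the seen-set A carries)
def PairsOk (rules : List (Int × List Int)) (checked : List Int) (rest : List Int) : Prop :=
  ∀ j < rest.length,
    (∀ x ∈ checked, x ∉ pvRules rules (rest.getD j 0)) ∧
    ∀ i < j, rest.getD i 0 ∉ pvRules rules (rest.getD j 0)

lemma goA_iff (rules : List (Int × List Int)) (rest : List Int) (checked : PySem.Set Int) :
    checkPagesGo rules rest checked = true ↔ PairsOk rules checked rest := by
  induction rest generalizing checked with
  | nil => simp [checkPagesGo, PairsOk]
  | cons page rest ih =>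
    rw [checkPagesGo]
    by_cases hc : ∀ x ∈ checked, x ∉ pvRules rules page
    · have hempty : (PySem.Set.inter checked (pvRules rules page)).isEmpty = true := by
        simp only [List.isEmpty_iff, List.eq_nil_iff_forall_not_mem]
        intro x hx
        rw [PySem.Set.mem_inter] at hx
        exact hc x hx.1 hx.2
      simp only [hempty, if_pos, ih]
      constructor
      · intro h j hj
        cases j with
        | zero =>
          refine ⟨hc, by omega⟩
        | succ j =>
          have hj' : j < rest.length := by simpa using hj
          obtain ⟨h1, h2⟩ := h j hj'
          refine ⟨?_, ?_⟩
          · intro x hx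
            exact h1 x (by rw [PySem.Set.mem_add]; exact Or.inl hx)
          · intro i hi
            cases i with
            | zero =>
              exact h1 page (by rw [PySem.Set.mem_add]; exact Or.inr rfl)
            | succ i =>
              simpa using h2 i (by omega)
      · intro h j hj
        obtain ⟨h1, h2⟩ := h (j + 1) (by simpa using Nat.succ_lt_succ hj)
        refine ⟨?_, ?_⟩
        · intro x hx
          rw [PySem.Set.mem_add] at hx
          cases hx with
          | inl hx => exact h1 x hx
          | inr hx => subst hx; simpa using h2 0 (by omega)
        · intro i hi
          simpa using h2 (i + 1) (by omega)
    · have hne : (PySem.Set.inter checked (pvRules rules page)).isEmpty ≠ true := by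
        push Not at hc
        obtain ⟨x, hx1, hx2⟩ := hc
        intro h
        rw [List.isEmpty_iff, List.eq_nil_iff_forall_not_mem] at h
        exact h x (by rw [PySem.Set.mem_inter]; exact ⟨hx1, hx2⟩)
      simp only [if_neg hne]
      constructor
      · intro h; exact absurd h (by simp)
      · intro h
        exact absurd (h 0 (by simp)).1 hc

-- the per-page condition B decides
def Bad (rules : List (Int × List Int)) (pages : List Int) (p : Int) : Prop :=
  ∃ i j, ∃ (_ : i < j) (hj : j < pages.length),
    pages[j] = p ∧ pages[i]'(by omega) ∈ pvRules rules p

lemma ruleViolated_iff (rules : List (Int × List Int)) (pages : List Int) (p : Int) :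
    ruleViolated rules pages pages.reverse (pages.length : Int) p = true ↔ Bad rules pages p := by
  unfold ruleViolated
  constructor
  · intro h
    cases hri : PySem.List.index? pages.reverse p with
    | none => rw [hri] at h; simp at h
    | some ri =>
      rw [hri] at h
      obtain ⟨hriLen', hrev, _⟩ := PySem.List.getElem_of_index?_eq_some hri
      have hriLen : ri < pages.length := by
        rw [List.length_reverse] at hriLen'; exact hriLen'
      rw [List.any_eq_true] at h
      obtain ⟨s, hs, hb⟩ := h
      rw [Bool.and_eq_true] at hb
      obtain ⟨hsc, hb⟩ := hb
      cases hsi : PySem.List.index? pages s with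
      | none => rw [hsi] at hb; simp at hb
      | some si =>
        rw [hsi] at hb
        simp only [decide_eq_true_eq] at hb
        obtain ⟨hsiLen, hfirst, _⟩ := PySem.List.getElem_of_index?_eq_some hsi
        have hbn : si < pages.length - 1 - ri := by omega
        refine ⟨si, pages.length - 1 - ri, by omega, by omega, ?_, ?_⟩
        · rw [← List.getElem_reverse]
          exact hrev
        · rw [hfirst]; exact hs
  · rintro ⟨i, j, hij, hj, hpj, hsi⟩
    have hpm : p ∈ pages.reverse := by
      rw [List.mem_reverse, ← hpj]; exact List.getElem_mem hj
    rw [← PySem.List.index?_isSome_iff] at hpm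
    cases hri : PySem.List.index? pages.reverse p with
    | none => rw [hri] at hpm; simp at hpm
    | some ri =>
      obtain ⟨hriLen', hrev, hmin⟩ := PySem.List.getElem_of_index?_eq_some hri
      have hriLen : ri < pages.length := by
        rw [List.length_reverse] at hriLen'; exact hriLen'
      -- pages.length - 1 - ri is the LAST occurrence of p: j ≤ pages.length - 1 - ri
      have hjle : j ≤ pages.length - 1 - ri := by
        by_contra hgt
        have h1 : pages.length - 1 - j < ri := by omega
        have : pages.reverse[pages.length - 1 - j]'(by rw [List.length_reverse]; omega) = p := by
          rw [List.getElem_reverse]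
          convert hpj using 2
          omega
        exact hmin _ h1 this
      set s := pages[i]'(by omega) with hsdef
      have hsm : s ∈ pages := List.getElem_mem (by omega)
      have hsc : pages.contains s = true := by
        rw [List.contains_eq_any_beq, List.any_eq_true]
        exact ⟨s, hsm, by simp⟩
      rw [← PySem.List.index?_isSome_iff] at hsm
      cases hsi' : PySem.List.index? pages s with
      | none => rw [hsi'] at hsm; simp at hsm
      | some si =>
        obtain ⟨hsiLen, hsfirst, hsmin⟩ := PySem.List.getElem_of_index?_eq_some hsi'
        have hsile : si ≤ i := by
          by_contra hgt
          exact hsmin i (by omega) hsdef.symm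
        rw [List.any_eq_true]
        refine ⟨s, hsi, ?_⟩
        rw [Bool.and_eq_true]
        refine ⟨hsc, ?_⟩
        rw [hsi']
        simp only [decide_eq_true_eq]
        omega

lemma altGo_iff (rules : List (Int × List Int)) (pages : List Int) (l : List Int) :
    checkAltGo rules pages pages.reverse (pages.length : Int) l = true ↔
      ∀ p ∈ l, ¬ Bad rules pages p := by
  induction l with
  | nil => simp [checkAltGo]
  | cons p rest ih =>
    rw [checkAltGo]
    constructor
    · intro h q hm
      by_cases hv : ruleViolated rules pages pages.reverse (pages.length : Int) p = true
      · rw [if_pos hv] at h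
        exact absurd h (by simp)
      · rw [if_neg hv] at h
        rcases List.mem_cons.mp hm with hEq | hm'
        · subst hEq
          exact fun hb => hv ((ruleViolated_iff _ _ _).mpr hb)
        · exact ih.mp h q hm'
    · intro h
      have hv : ¬ ruleViolated rules pages pages.reverse (pages.length : Int) p = true :=
        fun hv => h p List.mem_cons_self ((ruleViolated_iff _ _ _).mp hv)
      rw [if_neg hv]
      exact ih.mpr fun q hm => h q (List.mem_cons_of_mem _ hm)

-- bridge: the pairwise condition over positions equals the per-distinct-page condition
lemma bridge (rules : List (Int × List Int)) (pages : List Int) :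
    PairsOk rules [] pages ↔ ∀ p ∈ PySem.List.dedup pages, ¬ Bad rules pages p := by
  constructor
  · rintro h p _ ⟨i, j, hij, hj, hpj, hsi⟩
    have := (h j hj).2 i hij
    rw [List.getD_eq_getElem?_getD, List.getElem?_eq_getElem hj, Option.getD_some, hpj,
        List.getD_eq_getElem?_getD, List.getElem?_eq_getElem (by omega : i < pages.length),
        Option.getD_some] at this
    exact this hsi
  · intro h j hj
    refine ⟨by simp, ?_⟩
    intro i hij hmem
    have hpg : pages.getD j 0 = pages[j] := by
      rw [List.getD_eq_getElem?_getD, List.getElem?_eq_getElem hj, Option.getD_some]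
    have hig : pages.getD i 0 = pages[i]'(by omega) := by
      rw [List.getD_eq_getElem?_getD, List.getElem?_eq_getElem (by omega : i < pages.length),
          Option.getD_some]
    have hpd : pages.getD j 0 ∈ PySem.List.dedup pages := by
      rw [PySem.List.mem_dedup, hpg]; exact List.getElem_mem hj
    refine h (pages.getD j 0) hpd ⟨i, j, hij, hj, hpg.symm, ?_⟩
    rw [← hig]; exact hmem

-- ===== VERDICT (by name: the statement is the Claim_ definition above) =====
theorem check_pages_spec : Claim_equal_check_pages := by
  intro rules pages _ _
  unfold Spec_check_pages check_pages check_pages_alt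
  rw [Bool.eq_iff_iff, goA_iff, PySem.List.len_eq, altGo_iff]
  exact bridge rules pages
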